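-- pv_equiv track=rewrite | github.com/electronicdreamer/nicotine-plus | pynicotine/utils.py | clean_path
-- ===== SOURCE A (Python) =====
-- ILLEGALPATHCHARS = ["?", ":", ">", "<", "|", "*", '"']
--
-- REPLACEMENTCHAR = '_'
--
-- def clean_path(path, absolute=False):
--
--     # Without hacks it is (up to Vista) not possible to have more
--     # than 26 drives mounted, so we can assume a '[a-zA-Z]:\' prefix
--     # for drives - we shouldn't escape that
--     drive = ''
--     if absolute and path[1:3] == ':\\' and path[0:1] and path[0].isalpha():
--         drive = path[:3]
--         path = path[3:]
--
--     for char in ILLEGALPATHCHARS: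
--         path = path.replace(char, REPLACEMENTCHAR)
--
--     path = ''.join([drive, path])
--
--     # Path can never end with a period on Windows machines
--     path = path.rstrip('.')
--
--     return path
-- ===== SOURCE B (Python) =====
-- ILLEGALPATHCHARS = '?:><|*"'
--
-- REPLACEMENTCHAR = '_'
--
-- def clean_path(path, absolute=False):
--
--     pieces = []
--     start = 0
--     # same drive-prefix rule: a '[a-zA-Z]:\' prefix is kept verbatim
--     if absolute and len(path) >= 3 and path[0].isalpha() and path[1] == ':' and path[2] == '\\':
--         pieces.append(path[:3])
--         start = 3
--
--     # one left-to-right pass: replace illegal characters and hold back runs of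
--     # '.' so that a trailing run is never emitted (this is rstrip('.') on the fly)
--     dots = 0
--     for i in range(start, len(path)):
--         c = path[i]
--         if c == '.':
--             dots += 1
--         else:
--             if dots:
--                 pieces.append('.' * dots)
--                 dots = 0
--             pieces.append(REPLACEMENTCHAR if c in ILLEGALPATHCHARS else c)
--
--     return ''.join(pieces)
-- ===== Notes on version B (the rewrite author's own statement) =====
-- stated objective: alternative
-- what changed: Replaces A's staged pipeline (seven full-string replace passes, a join, then a trailing-period rstrip) with one left-to-right pass holding a pending-period counter, so illegal-char replacement and trailing-period stripping happen in a single traversal with no final rstrip.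
import Mathlib
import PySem

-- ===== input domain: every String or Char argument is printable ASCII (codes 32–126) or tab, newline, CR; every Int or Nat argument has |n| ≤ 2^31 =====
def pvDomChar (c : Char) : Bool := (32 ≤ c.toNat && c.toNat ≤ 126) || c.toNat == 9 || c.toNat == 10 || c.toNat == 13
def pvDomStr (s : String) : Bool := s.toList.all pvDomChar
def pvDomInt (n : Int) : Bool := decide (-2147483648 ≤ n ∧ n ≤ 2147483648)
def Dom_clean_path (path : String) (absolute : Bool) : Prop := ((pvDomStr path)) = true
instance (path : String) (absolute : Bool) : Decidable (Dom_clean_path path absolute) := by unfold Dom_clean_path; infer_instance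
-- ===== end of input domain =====

-- B replaces A's staged pipeline (seven str.replace passes, join, rstrip('.'))
-- with a single left-to-right pass holding back runs of '.' so a trailing run is
-- never emitted (objective: alternative).


-- ===== PORT A =====
-- ILLEGALPATHCHARS (A's module-level constant)
def pvIllegal : List Char := ['?', ':', '>', '<', '|', '*', '"']

-- the drive guard: absolute and path[1:3] == ':\\' and path[0:1] and path[0].isalpha()
-- (path[0] is only read when path[0:1] is nonempty, so the match's [] arm is unreachable)
def pvDriveGuard (cs : List Char) (absolute : Bool) : Bool :=
  absolute && (PySem.Chars.slice cs (some 1) (some 3) == [':', '\\'])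
    && !(PySem.Chars.slice cs (some 0) (some 1)).isEmpty
    && (match cs with | c :: _ => PySem.Chars.isalpha c | [] => false)

-- str.rstrip('.') ported by hand (PySem has no chars-argument rstrip): drop '.' from the right; exact
def pvRstripDots (cs : List Char) : List Char :=
  (cs.reverse.dropWhile (· == '.')).reverse

def clean_path (path : String) (absolute : Bool) : String :=
  let cs := path.toList
  let (drive, rest) :=
    if pvDriveGuard cs absolute then
      (PySem.Chars.slice cs none (some 3), PySem.Chars.slice cs (some 3) none)
    else ([], cs)
  -- for char in ILLEGALPATHCHARS: path = path.replace(char, REPLACEMENTCHAR)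
  let rest := pvIllegal.foldl (fun p c => PySem.Chars.replace p [c] ['_']) rest
  -- path = ''.join([drive, path])
  let joined := PySem.Chars.join [] [drive, rest]
  String.ofList (pvRstripDots joined)

-- ===== PORT B =====
-- B's guard: absolute and len(path) >= 3 and path[0].isalpha() and path[1] == ':' and path[2] == '\\'
def pvAltGuard (cs : List Char) (absolute : Bool) : Bool :=
  absolute && decide (3 ≤ cs.length)
    && (match cs with | c :: _ => PySem.Chars.isalpha c | [] => false)
    && (cs[1]? == some ':') && (cs[2]? == some '\\')

-- B's loop: pending-dot counter `dots`, emitted pieces kept reversed in `acc`;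
-- a run of '.' is flushed only when a later non-dot character is seen
def pvAltLoop : List Char → Nat → List Char → List Char
  | [], _dots, acc => acc.reverse
  | c :: t, dots, acc =>
    if c == '.' then pvAltLoop t (dots + 1) acc
    else pvAltLoop t 0
      ((if "?:><|*\"".toList.contains c then '_' else c) :: (List.replicate dots '.' ++ acc))

def clean_path_alt (path : String) (absolute : Bool) : String :=
  let cs := path.toList
  if pvAltGuard cs absolute then
    String.ofList (pvAltLoop (cs.drop 3) 0 (cs.take 3).reverse)
  else
    String.ofList (pvAltLoop cs 0 [])

-- ===== PRECONDITION & SPEC =====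
def Spec_clean_path (path : String) (absolute : Bool) (out : String) : Prop := out = clean_path_alt path absolute
instance (path : String) (absolute : Bool) (out : String) : Decidable (Spec_clean_path path absolute out) := by unfold Spec_clean_path; infer_instance

-- ===== CLAIM (what is proved, stated in full; the proofs are below) =====
def Claim_equal_clean_path : Prop := ∀ (path : String) (absolute : Bool), Dom_clean_path path absolute → Spec_clean_path path absolute (clean_path path absolute)

-- ===== LEMMAS AND PROOFS =====

-- single-char replace is a map
theorem pv_go_single (c d : Char) : ∀ (l : List Char) (fuel : Nat) (acc : List Char),
    l.length ≤ fuel →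
    PySem.Chars.replace.go [c] [d] fuel l acc
      = acc.reverse ++ l.map (fun x => if c == x then d else x) := by
  intro l
  induction l with
  | nil =>
      intro fuel acc _
      rw [PySem.Chars.replace.go.eq_def]
      cases fuel <;> simp
  | cons x t ih =>
      intro fuel acc h
      cases fuel with
      | zero => simp at h
      | succ n =>
          rw [PySem.Chars.replace.go.eq_def]
          simp only [List.isPrefixOf, Bool.and_true]
          by_cases hc : c == x
          · rw [if_pos hc, show List.drop [c].length (x :: t) = t from rfl,
              ih n ([d].reverse ++ acc) (by simpa using h), List.map_cons, if_pos hc]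
            simp
          · rw [if_neg hc,
              ih n (x :: acc) (by simpa using h), List.map_cons, if_neg hc]
            simp

theorem pv_replace_single (l : List Char) (c d : Char) :
    PySem.Chars.replace l [c] [d] = l.map (fun x => if c == x then d else x) := by
  unfold PySem.Chars.replace
  simpa using pv_go_single c d l l.length [] le_rfl

-- the composition of the seven single-char replacements, pointwise
theorem pv_pointwise (x : Char) :
    (fun y => if '"' == y then '_' else y)
      ((fun y => if '*' == y then '_' else y)
      ((fun y => if '|' == y then '_' else y)
      ((fun y => if '<' == y then '_' else y)
      ((fun y => if '>' == y then '_' else y)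
      ((fun y => if ':' == y then '_' else y)
      ((fun y => if '?' == y then '_' else y) x))))))
      = if pvIllegal.contains x then '_' else x := by
  by_cases h : x ∈ pvIllegal
  · simp only [pvIllegal, List.mem_cons, List.not_mem_nil, or_false] at h
    rcases h with h | h | h | h | h | h | h <;> subst h <;> decide
  · have hc : pvIllegal.contains x = false := by simpa using h
    rw [hc]
    simp only [pvIllegal, List.mem_cons, List.not_mem_nil, or_false, not_or] at h
    obtain ⟨h1, h2, h3, h4, h5, h6, h7⟩ := h
    simp [beq_iff_eq, Ne.symm h1, Ne.symm h2, Ne.symm h3, Ne.symm h4,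
      Ne.symm h5, Ne.symm h6, Ne.symm h7]

theorem pv_chain (l : List Char) :
    pvIllegal.foldl (fun p c => PySem.Chars.replace p [c] ['_']) l
      = l.map (fun c => if pvIllegal.contains c then '_' else c) := by
  conv_lhs => rw [show pvIllegal = ['?', ':', '>', '<', '|', '*', '"'] from rfl]
  rw [List.foldl_cons, List.foldl_cons, List.foldl_cons, List.foldl_cons,
    List.foldl_cons, List.foldl_cons, List.foldl_cons, List.foldl_nil]
  rw [pv_replace_single, pv_replace_single, pv_replace_single, pv_replace_single,
    pv_replace_single, pv_replace_single, pv_replace_single]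
  rw [List.map_map, List.map_map, List.map_map, List.map_map, List.map_map, List.map_map]
  refine List.map_congr_left fun x _ => ?_
  simp only [Function.comp_apply]
  exact pv_pointwise x

theorem pv_slice_take (xs : List Char) : PySem.List.slice xs none (some 3) = xs.take 3 := by
  have h := PySem.List.slice_to_natCast xs 3
  norm_num at h
  exact h

theorem pv_slice_drop (xs : List Char) : PySem.List.slice xs (some 3) none = xs.drop 3 := by
  have h := PySem.List.slice_from_natCast xs 3
  norm_num at h
  exact h

theorem pv_join_pair (a b : List Char) : PySem.Chars.join [] [a, b] = a ++ b := by
  simp [PySem.Chars.join, List.intercalate, List.intersperse]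

-- the two drive guards agree
theorem pv_slice13 (xs : List Char) :
    PySem.List.slice xs (some 1) (some 3) = (xs.drop 1).take 2 := by
  have h := PySem.List.slice_natCast xs 1 3
  norm_num at h
  simpa using h

theorem pv_slice01 (xs : List Char) :
    PySem.List.slice xs (some 0) (some 1) = xs.take 1 := by
  have h := PySem.List.slice_natCast xs 0 1
  norm_num at h
  simpa using h

theorem pv_guard_eq (cs : List Char) (absolute : Bool) :
    pvAltGuard cs absolute = pvDriveGuard cs absolute := by
  match cs with
  | [] => simp [pvAltGuard, pvDriveGuard, PySem.Chars.slice_eq_listSlice, pv_slice13, pv_slice01]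
  | [a] => simp [pvAltGuard, pvDriveGuard, PySem.Chars.slice_eq_listSlice, pv_slice13, pv_slice01]
  | [a, b] => simp [pvAltGuard, pvDriveGuard, PySem.Chars.slice_eq_listSlice, pv_slice13, pv_slice01]
  | a :: b :: c :: t =>
      simp only [pvAltGuard, pvDriveGuard, PySem.Chars.slice_eq_listSlice, pv_slice13, pv_slice01]
      cases absolute <;> by_cases hb : b = ':' <;> by_cases hc : c = '\\' <;>
        simp_all [List.length_cons, Bool.and_comm, Bool.and_left_comm, Bool.and_assoc]

theorem pv_rstrip_replicate (n : Nat) : pvRstripDots (List.replicate n '.') = [] := by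
  simp [pvRstripDots, List.dropWhile_replicate]

theorem pv_rstrip_mid (n : Nat) (c : Char) (m : List Char) (hc : (c == '.') = false) :
    pvRstripDots (List.replicate n '.' ++ c :: m)
      = List.replicate n '.' ++ c :: pvRstripDots m := by
  unfold pvRstripDots
  rw [List.reverse_append, List.reverse_cons]
  rw [show m.reverse ++ [c] ++ (List.replicate n '.').reverse
        = m.reverse ++ (c :: (List.replicate n '.').reverse) by simp]
  rw [List.dropWhile_append]
  by_cases h : (m.reverse.dropWhile (· == '.')).isEmpty
  · simp only [h, if_pos]
    rw [List.dropWhile_cons_of_neg (by simp [hc])]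
    rw [List.isEmpty_iff] at h
    simp [h]
  · simp only [h, if_neg, Bool.false_eq_true, if_false]
    simp

-- B's loop computes "emitted ++ rstrip('.') of (pending dots ++ sanitized remainder)"
theorem pv_altLoop_eq (l : List Char) : ∀ (dots : Nat) (acc : List Char),
    pvAltLoop l dots acc
      = acc.reverse ++ pvRstripDots (List.replicate dots '.'
          ++ l.map (fun c => if pvIllegal.contains c then '_' else c)) := by
  induction l with
  | nil =>
      intro dots acc
      simp [pvAltLoop, pv_rstrip_replicate]
  | cons c t ih =>
      intro dots acc
      by_cases hc : (c == '.') = true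
      · have hc' : c = '.' := by simpa using hc
        subst hc'
        rw [pvAltLoop, if_pos hc, ih]
        have hf : (if pvIllegal.contains '.' then '_' else '.') = '.' := by decide
        rw [List.map_cons, hf,
          show List.replicate dots '.' ++ '.' :: t.map (fun c => if pvIllegal.contains c then '_' else c)
             = List.replicate (dots + 1) '.' ++ t.map (fun c => if pvIllegal.contains c then '_' else c) by
            rw [List.replicate_succ']; simp]
      · have hcf : (c == '.') = false := by simpa using hc
        rw [pvAltLoop, if_neg (by simp [hcf]), ih]
        have hlist : "?:><|*\"".toList = pvIllegal := by decide
        have hf : ((if pvIllegal.contains c then '_' else c) == '.') = false := by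
          cases hm : pvIllegal.contains c
          · simpa [hm] using hcf
          · simp [hm]
        rw [hlist, List.map_cons, pv_rstrip_mid _ _ _ hf]
        simp [List.replicate]

theorem pv_rstrip_drive (a : Char) (m : List Char) :
    pvRstripDots ([a, ':', '\\'] ++ m) = [a, ':', '\\'] ++ pvRstripDots m := by
  unfold pvRstripDots
  rw [List.reverse_append, List.dropWhile_append]
  by_cases h : (m.reverse.dropWhile (· == '.')).isEmpty
  · rw [List.isEmpty_iff] at h
    simp [h, List.dropWhile]
  · simp only [h, Bool.false_eq_true, if_false]
    simp

-- ===== VERDICT (by name: the statement is the Claim_ definition above) =====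
theorem clean_path_spec : Claim_equal_clean_path := by
  intro path absolute _
  unfold Spec_clean_path
  simp only [clean_path, clean_path_alt]
  rw [pv_guard_eq]
  by_cases hg : pvDriveGuard path.toList absolute
  · -- guard holds: path.toList = a :: ':' :: '\\' :: t
    have hg' : pvAltGuard path.toList absolute = true := by rw [pv_guard_eq]; exact hg
    obtain ⟨a, b, c, t, hcs⟩ : ∃ a b c t, path.toList = a :: b :: c :: t := by
      match h : path.toList with
      | [] => rw [h] at hg'; simp [pvAltGuard] at hg'
      | [x] => rw [h] at hg'; simp [pvAltGuard] at hg'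
      | [x, y] => rw [h] at hg'; simp [pvAltGuard] at hg'
      | x :: y :: z :: t => exact ⟨x, y, z, t, rfl⟩
    rw [hcs] at hg hg'
    have hbc : b = ':' ∧ c = '\\' := by
      simp [pvAltGuard] at hg'
      tauto
    obtain ⟨hb, hc⟩ := hbc
    subst hb; subst hc
    rw [hcs]
    simp only [hg, if_pos, pv_chain, pv_join_pair, PySem.Chars.slice_eq_listSlice,
      pv_slice_take, pv_slice_drop]
    rw [pv_altLoop_eq]
    simp only [List.take, List.drop, List.replicate, List.nil_append, List.reverse_reverse,
      List.reverse_cons, List.reverse_nil, List.map_cons, List.append_assoc, List.cons_append,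
      List.nil_append]
    exact congrArg String.ofList (pv_rstrip_drive a _)
  · simp only [hg, Bool.false_eq_true, if_false]
    rw [pv_altLoop_eq]
    simp [pv_chain, pv_join_pair]
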